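-- pv_equiv track=rewrite | github.com/EmnlSoc7/crp_eb | core_criptography.py | convert_key
-- ===== SOURCE A (Python) =====
-- def convert_key(keyword: str) -> list[int]:
--     """
--     Retorna uma lista numérica representando a posição
--     alfabética de cada caractere de uma palavra especifica.
--
--     Parametros:
--         keyword (str): Palavra única
--
--     Retorno:
--         keyword_order (list[int]): lista numérica da ordem alfabética
--     """
--
--     alphabet = "abcdefghijklmnopqrstuvwxyz0123456789"
--
--     keyword = keyword.lower()
--     keyword_order = [0 for _ in range(len(keyword))]  # lista de zeros
--     keyword_lower = keyword
--
--     count = 1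
--     for letter in alphabet:  # percorre o alfabeto
--         for index, char in enumerate(keyword_lower):  # percorre a palavra
--             if letter == char:
--                 keyword_order[index] = count  # substitui 0 pela posição
--                 count += 1  # aumenta o contador
--
--     return keyword_order
-- ===== SOURCE B (Python) =====
-- def convert_key(keyword: str) -> list[int]:
--     alphabet = "abcdefghijklmnopqrstuvwxyz0123456789"
--     kw = keyword.lower()
--     letters = set(alphabet)
--     counts = {c: 0 for c in alphabet}
--     for c in kw:
--         if c in letters:
--             counts[c] += 1
--     next_rank = {}
--     r = 1
--     for c in alphabet:
--         next_rank[c] = r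
--         r += counts[c]
--     out = []
--     for c in kw:
--         if c in letters:
--             out.append(next_rank[c])
--             next_rank[c] += 1
--         else:
--             out.append(0)
--     return out
-- ===== Notes on version B (the rewrite author's own statement) =====
-- stated objective: faster
-- what changed: A makes one pass over the keyword per alphabet character (36 passes), assigning ranks letter by letter; B is a counting sort: one pass counts occurrences per alphabet character, one pass over the alphabet computes each character's starting rank by prefix sums, and one final pass assigns ranks (ties broken left-to-right by the in-pass increment).
import Mathlib
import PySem

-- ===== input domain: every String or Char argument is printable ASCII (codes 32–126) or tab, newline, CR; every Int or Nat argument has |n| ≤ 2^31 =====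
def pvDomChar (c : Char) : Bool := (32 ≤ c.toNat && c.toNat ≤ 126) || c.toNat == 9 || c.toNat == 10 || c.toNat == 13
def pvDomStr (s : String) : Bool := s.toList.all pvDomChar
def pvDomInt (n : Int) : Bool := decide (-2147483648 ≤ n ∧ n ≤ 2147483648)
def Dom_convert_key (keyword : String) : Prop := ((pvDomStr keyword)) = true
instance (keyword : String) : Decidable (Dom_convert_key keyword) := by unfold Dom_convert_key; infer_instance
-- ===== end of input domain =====

-- B replaces A's 36 passes over the keyword (one per alphabet letter) by a counting sort:
-- one pass counting occurrences, one pass over the alphabet computing each letter's starting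
-- rank, one pass assigning ranks.

-- ===== PORT A =====
def convert_key (keyword : String) : List Int :=
  let alphabet := "abcdefghijklmnopqrstuvwxyz0123456789"
  let kw := PySem.Str.lower keyword
  let keyword_order : List Int := (PySem.List.pyRange 0 (PySem.Str.len kw)).map (fun _ => 0)
  (alphabet.toList.foldl
    (fun (st : List Int × Int) letter =>
      (PySem.List.enumerate kw.toList).foldl
        (fun (st : List Int × Int) p =>
          if letter == p.2 then (st.1.set p.1.toNat st.2, st.2 + 1) else st)
        st)
    (keyword_order, 1)).1

-- ===== PORT B =====
def convert_key_alt (keyword : String) : List Int :=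
  let alphabet := "abcdefghijklmnopqrstuvwxyz0123456789"
  let kw := PySem.Str.lower keyword
  let letters : PySem.Set Char := PySem.Set.ofList alphabet.toList
  let counts : PySem.Dict Char Int :=
    kw.toList.foldl
      (fun d c => if PySem.Set.contains letters c then d.modify c 0 (· + 1) else d)
      (alphabet.toList.foldl (fun d c => d.insert c 0) PySem.Dict.empty)
  let nr := alphabet.toList.foldl
      (fun (st : PySem.Dict Char Int × Int) c => (st.1.insert c st.2, st.2 + counts.getD c 0))
      (PySem.Dict.empty, 1)
  (kw.toList.foldl
      (fun (st : PySem.Dict Char Int × List Int) c =>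
        if PySem.Set.contains letters c then (st.1.modify c 0 (· + 1), st.2 ++ [st.1.getD c 0])
        else (st.1, st.2 ++ [0]))
      (nr.1, ([] : List Int))).2

-- ===== PRECONDITION & SPEC =====
def Spec_convert_key (keyword : String) (out : List Int) : Prop := out = convert_key_alt keyword
instance (keyword : String) (out : List Int) : Decidable (Spec_convert_key keyword out) := by unfold Spec_convert_key; infer_instance

-- ===== CLAIM (what is proved, stated in full; the proofs are below) =====
def Claim_equal_convert_key : Prop := ∀ (keyword : String), Dom_convert_key keyword → Spec_convert_key keyword (convert_key keyword)

-- ===== LEMMAS AND PROOFS =====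

-- the alphabet, as a list of characters
def pvAlpha : List Char := "abcdefghijklmnopqrstuvwxyz0123456789".toList

lemma pvAlpha_nodup : pvAlpha.Nodup := by decide

-- number of keyword occurrences of letters strictly before ch in the alphabet
def pvBsum (kw : List Char) (ch : Char) : Int :=
  ((pvAlpha.takeWhile (fun x => x ≠ ch)).map (fun d => (kw.count d : Int))).sum

-- the common value of both programs
def pvR (kw : List Char) : List Int :=
  (List.range kw.length).map (fun i =>
    match kw[i]? with
    | some ch => if ch ∈ pvAlpha then 1 + pvBsum kw ch + ((kw.take i).count ch : Int) else 0
    | none => 0)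

lemma pv_contains_iff (l : List Char) (x : Char) :
    PySem.Set.contains (PySem.Set.ofList l) x = true ↔ x ∈ l := by
  rw [show PySem.Set.contains (PySem.Set.ofList l) x = List.elem x (PySem.Set.ofList l) from rfl]
  rw [List.elem_iff]
  exact PySem.Set.mem_ofList l x

-- setting an element of a mapped range is updating the mapped function
lemma pv_set_range_map (n j : Nat) (f : Nat → Int) (x : Int) :
    ((List.range n).map f).set j x = (List.range n).map (fun i => if j = i then x else f i) := by
  apply List.ext_getElem
  · simp
  · intro i h1 h2
    simp [List.getElem_set]

-- effect of A's inner loop (one alphabet letter's pass over the keyword)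
lemma pv_innerA (l : Char) (n : Nat) :
    ∀ (w : List Char) (s : Nat) (f : Nat → Int) (c : Int),
    (PySem.List.enumerate w (s : Int)).foldl
        (fun (st : List Int × Int) p =>
          if l == p.2 then (st.1.set p.1.toNat st.2, st.2 + 1) else st)
        ((List.range n).map f, c)
    = ((List.range n).map (fun i =>
          if s ≤ i ∧ w[i - s]? = some l then c + ((w.take (i - s)).count l : Int) else f i),
       c + (w.count l : Int)) := by
  intro w
  induction w with
  | nil =>
    intro s f c
    rw [PySem.List.enumerate_nil, List.foldl_nil]
    simp only [List.count_nil, Nat.cast_zero, add_zero, Prod.mk.injEq]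
    refine ⟨List.map_congr_left fun i _ => ?_, by trivial⟩
    simp
  | cons x t ih =>
    intro s f c
    rw [PySem.List.enumerate_cons, List.foldl_cons]
    have hs1 : (s : Int) + 1 = ((s + 1 : Nat) : Int) := by push_cast; ring
    by_cases hx : l = x
    · subst hx
      simp only [beq_self_eq_true, if_true, Int.toNat_natCast]
      rw [pv_set_range_map, hs1, ih (s + 1) _ (c + 1)]
      simp only [Prod.mk.injEq]
      constructor
      · apply List.map_congr_left
        intro i _
        rcases Nat.lt_trichotomy i s with h | h | h
        · rw [if_neg (show ¬ (s + 1 ≤ i ∧ t[i - (s + 1)]? = some l) by rintro ⟨a, -⟩; omega),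
              if_neg (show ¬ (s ≤ i ∧ (l :: t)[i - s]? = some l) by rintro ⟨a, -⟩; omega),
              if_neg (show ¬ (s = i) by omega)]
        · subst h
          have e0 : i - i = 0 := by omega
          rw [if_neg (show ¬ (i + 1 ≤ i ∧ t[i - (i + 1)]? = some l) by rintro ⟨a, -⟩; omega),
              if_pos rfl, e0, List.getElem?_cons_zero]
          rw [if_pos ⟨Nat.le_refl i, rfl⟩]
          simp
        · obtain ⟨k, rfl⟩ : ∃ k, i = s + 1 + k := ⟨i - s - 1, by omega⟩
          have e1 : s + 1 + k - (s + 1) = k := by omega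
          have e2 : s + 1 + k - s = k + 1 := by omega
          rw [e1, e2, List.getElem?_cons_succ, List.take_succ_cons]
          by_cases hk : t[k]? = some l
          · rw [if_pos ⟨by omega, hk⟩, if_pos ⟨by omega, hk⟩, List.count_cons_self]
            push_cast; ring
          · rw [if_neg (show ¬ (s + 1 ≤ s + 1 + k ∧ t[k]? = some l) from fun hh => hk hh.2),
                if_neg (show ¬ (s ≤ s + 1 + k ∧ t[k]? = some l) from fun hh => hk hh.2),
                if_neg (show ¬ (s = s + 1 + k) by omega)]
      · rw [List.count_cons_self]; push_cast; ring
    · have hbx : (l == x) = false := by simp [hx]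
      simp only [hbx, Bool.false_eq_true, if_false]
      rw [hs1, ih (s + 1) f c]
      simp only [Prod.mk.injEq]
      constructor
      · apply List.map_congr_left
        intro i _
        rcases Nat.lt_trichotomy i s with h | h | h
        · rw [if_neg (show ¬ (s + 1 ≤ i ∧ t[i - (s + 1)]? = some l) by rintro ⟨a, -⟩; omega),
              if_neg (show ¬ (s ≤ i ∧ (x :: t)[i - s]? = some l) by rintro ⟨a, -⟩; omega)]
        · subst h
          have e0 : i - i = 0 := by omega
          rw [if_neg (show ¬ (i + 1 ≤ i ∧ t[i - (i + 1)]? = some l) by rintro ⟨a, -⟩; omega),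
              e0, List.getElem?_cons_zero,
              if_neg (show ¬ (i ≤ i ∧ some x = some l) from
                fun hh => hx (Option.some.inj hh.2).symm)]
        · obtain ⟨k, rfl⟩ : ∃ k, i = s + 1 + k := ⟨i - s - 1, by omega⟩
          have e1 : s + 1 + k - (s + 1) = k := by omega
          have e2 : s + 1 + k - s = k + 1 := by omega
          rw [e1, e2, List.getElem?_cons_succ, List.take_succ_cons]
          by_cases hk : t[k]? = some l
          · rw [if_pos ⟨by omega, hk⟩, if_pos ⟨by omega, hk⟩,
                List.count_cons_of_ne (Ne.symm hx)]
          · rw [if_neg (show ¬ (s + 1 ≤ s + 1 + k ∧ t[k]? = some l) from fun hh => hk hh.2),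
                if_neg (show ¬ (s ≤ s + 1 + k ∧ t[k]? = some l) from fun hh => hk hh.2)]
      · rw [List.count_cons_of_ne (Ne.symm hx)]

-- effect of A's outer loop over a duplicate-free list of letters
lemma pv_outerA (kw : List Char) :
    ∀ (L : List Char), L.Nodup → ∀ (f : Nat → Int) (c : Int),
    L.foldl
        (fun (st : List Int × Int) letter =>
          (PySem.List.enumerate kw).foldl
            (fun (st : List Int × Int) p =>
              if letter == p.2 then (st.1.set p.1.toNat st.2, st.2 + 1) else st)
            st)
        ((List.range kw.length).map f, c)
    = ((List.range kw.length).map (fun i =>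
          match kw[i]? with
          | some ch => if ch ∈ L then
              c + ((L.takeWhile (fun x => x ≠ ch)).map (fun d => (kw.count d : Int))).sum
                + ((kw.take i).count ch : Int)
            else f i
          | none => f i),
       c + (L.map (fun d => (kw.count d : Int))).sum) := by
  intro L
  induction L with
  | nil =>
    intro _ f c
    rw [List.foldl_nil]
    simp only [List.map_nil, List.sum_nil, add_zero, Prod.mk.injEq]
    refine ⟨List.map_congr_left fun i _ => ?_, by trivial⟩
    cases kw[i]? <;> simp
  | cons l t ih =>
    intro hnd f c
    obtain ⟨hl, hnt⟩ := List.nodup_cons.mp hnd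
    rw [List.foldl_cons]
    have hin := pv_innerA l kw.length kw 0 f c
    simp only [Nat.cast_zero, Nat.sub_zero, Nat.zero_le, true_and] at hin
    rw [hin, ih hnt _ (c + (kw.count l : Int))]
    simp only [Prod.mk.injEq]
    constructor
    · apply List.map_congr_left
      intro i _
      cases kw[i]? with
      | none => simp
      | some ch =>
        dsimp only
        by_cases hct : ch ∈ t
        · have hchl : ch ≠ l := fun he => hl (he ▸ hct)
          rw [if_pos hct, if_pos (List.mem_cons_of_mem l hct), List.takeWhile_cons]
          have hd : (decide (l ≠ ch)) = true := decide_eq_true (Ne.symm hchl)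
          simp only [hd, if_true, List.map_cons, List.sum_cons]
          ring
        · rw [if_neg hct]
          by_cases hcl : ch = l
          · subst hcl
            rw [if_pos rfl, if_pos (List.mem_cons_self ..), List.takeWhile_cons]
            simp
          · rw [if_neg (show ¬ (some ch = some l) from fun hh => hcl (Option.some.inj hh)),
                if_neg (by simp [hcl, hct])]
    · rw [List.map_cons, List.sum_cons]; ring

lemma pv_A_eq (s : String) : convert_key s = pvR (PySem.Str.lower s).toList := by
  have halpha : ("abcdefghijklmnopqrstuvwxyz0123456789" : String).toList = pvAlpha := rfl
  simp only [convert_key]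
  rw [halpha]
  have hlen : (PySem.List.pyRange 0 (PySem.Str.len (PySem.Str.lower s))).map (fun _ => (0 : Int))
      = (List.range (PySem.Str.lower s).toList.length).map (fun _ => (0 : Int)) := by
    rw [PySem.Str.len_eq, PySem.List.pyRange_zero_natCast, List.map_map]
    rfl
  rw [hlen, pv_outerA (PySem.Str.lower s).toList pvAlpha pvAlpha_nodup (fun _ => 0) 1]
  unfold pvR
  apply List.map_congr_left
  intro i _
  cases (PySem.Str.lower s).toList[i]? with
  | none => simp
  | some ch =>
    dsimp only
    by_cases hc : ch ∈ pvAlpha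
    · rw [if_pos hc, if_pos hc]; rfl
    · rw [if_neg hc, if_neg hc]

-- B-side lemmas
lemma pv_d0_getD :
    ∀ (L : List Char) (d : PySem.Dict Char Int), (∀ x, d.getD x 0 = 0) →
    ∀ ch, (L.foldl (fun d c => d.insert c 0) d).getD ch 0 = 0 := by
  intro L
  induction L with
  | nil => intro d hd ch; exact hd ch
  | cons c t ih =>
    intro d hd ch
    rw [List.foldl_cons]
    apply ih
    intro x
    rw [PySem.Dict.getD_insert]
    split
    · rfl
    · exact hd x

lemma pv_counts_getD (kw : List Char) (ch : Char) (hch : ch ∈ pvAlpha) :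
    ((kw.foldl
        (fun d c => if PySem.Set.contains (PySem.Set.ofList pvAlpha) c then d.modify c 0 (· + 1) else d)
        (pvAlpha.foldl (fun d c => d.insert c 0) PySem.Dict.empty)).getD ch 0)
    = (kw.count ch : Int) := by
  rw [PySem.List.foldl_if_eq_foldl_filter]
  rw [PySem.Dict.getD_foldl_modify_add_one]
  rw [pv_d0_getD pvAlpha PySem.Dict.empty (fun x => PySem.Dict.getD_empty x 0) ch]
  rw [List.count_filter ((pv_contains_iff pvAlpha ch).mpr hch)]
  simp

-- effect of B's second loop (starting ranks), over any counts dictionary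
lemma pv_nr_getD (cn : PySem.Dict Char Int) :
    ∀ (L : List Char), L.Nodup → ∀ (d : PySem.Dict Char Int) (r : Int) (ch : Char),
    ((L.foldl (fun (st : PySem.Dict Char Int × Int) c => (st.1.insert c st.2, st.2 + cn.getD c 0)) (d, r)).1).getD ch 0
    = if ch ∈ L then r + ((L.takeWhile (fun x => x ≠ ch)).map (fun x => cn.getD x 0)).sum
      else d.getD ch 0 := by
  intro L
  induction L with
  | nil => intro _ d r ch; simp
  | cons c' t ih =>
    intro hnd d r ch
    obtain ⟨hc', hnt⟩ := List.nodup_cons.mp hnd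
    rw [List.foldl_cons, ih hnt]
    by_cases hch : ch = c'
    · subst hch
      rw [if_neg hc', PySem.Dict.getD_insert_self, if_pos (List.mem_cons_self ..),
          List.takeWhile_cons]
      simp
    · rw [List.takeWhile_cons]
      have hd : (decide (c' ≠ ch)) = true := decide_eq_true (Ne.symm hch)
      simp only [hd, if_true, List.map_cons, List.sum_cons]
      by_cases hct : ch ∈ t
      · rw [if_pos hct, if_pos (List.mem_cons_of_mem c' hct)]
        ring
      · rw [if_neg hct, if_neg (by simp [hch, hct]),
            PySem.Dict.getD_insert_of_ne _ _ _ hch]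

-- B's second loop together with the counted values: the starting rank of each alphabet letter
lemma pv_nr_full (kw : List Char) (ch : Char) (hch : ch ∈ pvAlpha) :
    ((pvAlpha.foldl
        (fun (st : PySem.Dict Char Int × Int) c => (st.1.insert c st.2,
          st.2 + (kw.foldl
            (fun d c => if PySem.Set.contains (PySem.Set.ofList pvAlpha) c then d.modify c 0 (· + 1) else d)
            (pvAlpha.foldl (fun d c => d.insert c 0) PySem.Dict.empty)).getD c 0))
        (PySem.Dict.empty, 1)).1).getD ch 0
    = 1 + pvBsum kw ch := by
  rw [pv_nr_getD _ pvAlpha pvAlpha_nodup PySem.Dict.empty 1 ch, if_pos hch]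
  unfold pvBsum
  rw [List.map_congr_left
    (fun x hx => pv_counts_getD kw x ((List.takeWhile_sublist _).subset hx))]

-- effect of B's third loop (assigning ranks)
lemma pv_thirdB :
    ∀ (w : List Char) (nr : PySem.Dict Char Int) (out : List Int),
    (w.foldl
        (fun (st : PySem.Dict Char Int × List Int) c =>
          if PySem.Set.contains (PySem.Set.ofList pvAlpha) c then (st.1.modify c 0 (· + 1), st.2 ++ [st.1.getD c 0])
          else (st.1, st.2 ++ [0]))
        (nr, out)).2
    = out ++ (List.range w.length).map (fun i =>
        match w[i]? with
        | some ch => if ch ∈ pvAlpha then nr.getD ch 0 + ((w.take i).count ch : Int) else 0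
        | none => 0) := by
  intro w
  induction w with
  | nil => intro nr out; simp
  | cons x t ih =>
    intro nr out
    rw [List.foldl_cons]
    dsimp only
    by_cases hx : PySem.Set.contains (PySem.Set.ofList pvAlpha) x = true
    · rw [if_pos hx, ih]
      simp only [List.length_cons]
      rw [List.range_succ_eq_map, List.map_cons, List.map_map,
          List.append_assoc, List.singleton_append]
      have hxa : x ∈ pvAlpha := (pv_contains_iff pvAlpha x).mp hx
      congr 1
      congr 1
      · simp [hxa]
      · apply List.map_congr_left
        intro i _
        simp only [Function.comp_apply, List.getElem?_cons_succ, Nat.succ_eq_add_one]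
        cases h : t[i]? with
        | none => simp
        | some ch =>
          simp only []
          by_cases hca : ch ∈ pvAlpha
          · rw [if_pos hca, if_pos hca, List.take_succ_cons]
            by_cases hcx : ch = x
            · subst hcx
              rw [List.count_cons_self, PySem.Dict.getD_modify_self]
              push_cast; ring
            · rw [List.count_cons_of_ne (Ne.symm hcx),
                  PySem.Dict.getD_modify_of_ne _ _ _ hcx]
          · rw [if_neg hca, if_neg hca]
    · rw [if_neg hx, ih]
      simp only [List.length_cons]
      rw [List.range_succ_eq_map, List.map_cons, List.map_map,
          List.append_assoc, List.singleton_append]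
      have hxa : x ∉ pvAlpha := fun hm => hx ((pv_contains_iff pvAlpha x).mpr hm)
      congr 1
      congr 1
      · simp [hxa]
      · apply List.map_congr_left
        intro i _
        simp only [Function.comp_apply, List.getElem?_cons_succ, Nat.succ_eq_add_one]
        cases h : t[i]? with
        | none => simp
        | some ch =>
          simp only []
          by_cases hca : ch ∈ pvAlpha
          · have hcx : ch ≠ x := fun he => hxa (he ▸ hca)
            rw [if_pos hca, if_pos hca, List.take_succ_cons,
                List.count_cons_of_ne (Ne.symm hcx)]
          · rw [if_neg hca, if_neg hca]

lemma pv_B_eq (s : String) : convert_key_alt s = pvR (PySem.Str.lower s).toList := by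
  have halpha : ("abcdefghijklmnopqrstuvwxyz0123456789" : String).toList = pvAlpha := rfl
  simp only [convert_key_alt]
  rw [halpha, pv_thirdB, List.nil_append]
  unfold pvR
  apply List.map_congr_left
  intro i _
  cases (PySem.Str.lower s).toList[i]? with
  | none => simp
  | some ch =>
    dsimp only
    by_cases hc : ch ∈ pvAlpha
    · rw [if_pos hc, if_pos hc, pv_nr_full (PySem.Str.lower s).toList ch hc]
    · rw [if_neg hc, if_neg hc]

-- ===== VERDICT (by name: the statement is the Claim_ definition above) =====
theorem convert_key_spec : Claim_equal_convert_key := by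
  intro keyword _
  unfold Spec_convert_key
  rw [pv_A_eq, pv_B_eq]
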